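-- pv_equiv track=rewrite | github.com/ExplorerZhyuxin/MSICKB | Code/07_M36_TCGA_mutation_validation_revised.py | choose_msisensor_attr_id
-- ===== SOURCE A (Python) =====
-- def choose_msisensor_attr_id(clinical_data):
--     """
--     Choose a single MSIsensor-related clinical attribute per study.
--     Excludes MANTIS.
--     """
--     attr_ids = sorted({str(item.get("clinicalAttributeId", "")) for item in clinical_data})
--
--     candidates = []
--     for attr_id in attr_ids:
--         attr_upper = attr_id.upper().replace("_", "").replace(" ", "")
--         if "MSISENSOR" in attr_upper and "MANTIS" not in attr_upper:
--             candidates.append(attr_id)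
--
--     # Priority rules
--     preferred_exact = [
--         "MSISENSOR_SCORE",
--         "MSISENSOR",
--         "MSI_SENSOR_SCORE",
--         "MSI_SENSOR"
--     ]
--
--     for pref in preferred_exact:
--         for attr_id in candidates:
--             if attr_id.upper() == pref:
--                 return attr_id, candidates
--
--     # Secondary preference: contains both MSI and SCORE and SENSOR
--     for attr_id in candidates:
--         au = attr_id.upper().replace("_", "").replace(" ", "")
--         if "MSI" in au and "SENSOR" in au and "SCORE" in au:
--             return attr_id, candidates
--
--     return (candidates[0] if candidates else None), candidates
-- ===== SOURCE B (Python) =====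
-- PREFERRED = ["MSISENSOR_SCORE", "MSISENSOR", "MSI_SENSOR_SCORE", "MSI_SENSOR"]
--
--
-- def _norm(s):
--     return s.upper().replace("_", "").replace(" ", "")
--
--
-- def _rank(attr_id):
--     u = attr_id.upper()
--     if u in PREFERRED:
--         return PREFERRED.index(u)
--     n = _norm(attr_id)
--     return 4 if ("MSI" in n and "SENSOR" in n and "SCORE" in n) else 5
--
--
-- def choose_msisensor_attr_id(clinical_data):
--     """
--     Choose a single MSIsensor-related clinical attribute per study.
--     Excludes MANTIS. One key-ranked selection pass instead of tiered scans.
--     """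
--     attr_ids = sorted({str(item.get("clinicalAttributeId", "")) for item in clinical_data})
--     candidates = [a for a in attr_ids if "MSISENSOR" in _norm(a) and "MANTIS" not in _norm(a)]
--     if not candidates:
--         return None, candidates
--     return min(candidates, key=_rank), candidates
-- ===== Notes on version B (the rewrite author's own statement) =====
-- stated objective: simpler
-- what changed: The tiered preference search (4 exact-match scans, a secondary contains-scan, and a candidates[0] fallback) is replaced by a single rank function and one stable min(candidates, key=rank) selection pass over a comprehension-built candidate list.
import Mathlib
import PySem

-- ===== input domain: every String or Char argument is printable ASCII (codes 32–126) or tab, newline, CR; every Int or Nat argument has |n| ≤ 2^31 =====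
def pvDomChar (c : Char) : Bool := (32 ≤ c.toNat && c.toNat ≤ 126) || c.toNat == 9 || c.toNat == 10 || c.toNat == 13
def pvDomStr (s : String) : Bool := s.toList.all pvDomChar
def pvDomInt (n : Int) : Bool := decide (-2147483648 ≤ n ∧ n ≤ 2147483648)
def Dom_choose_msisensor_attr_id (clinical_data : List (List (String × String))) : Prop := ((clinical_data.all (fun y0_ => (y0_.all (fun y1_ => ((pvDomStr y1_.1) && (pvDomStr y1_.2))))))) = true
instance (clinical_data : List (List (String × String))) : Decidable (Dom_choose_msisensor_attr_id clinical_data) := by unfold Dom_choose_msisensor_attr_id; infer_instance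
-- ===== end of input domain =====

-- B replaces A's tiered preference scans by one rank function and a single stable
-- min-by-rank selection pass (objective: simpler; same return value everywhere).

-- ===== PORT A =====
def choose_msisensor_attr_id (clinical_data : List (List (String × String))) : Option String × List String :=
  let attr_ids := PySem.List.sorted
    (PySem.Set.ofList (clinical_data.map (fun item => PySem.Dict.getD ⟨item⟩ "clinicalAttributeId" "")))
    (fun x => x) false
  let candidates := attr_ids.foldl (fun acc attr_id =>
    let attr_upper := PySem.Str.replace (PySem.Str.replace (PySem.Str.upper attr_id) "_" "") " " ""
    if PySem.Str.isIn "MSISENSOR" attr_upper && !PySem.Str.isIn "MANTIS" attr_upper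
    then acc ++ [attr_id] else acc) []
  let preferred_exact : List String := ["MSISENSOR_SCORE", "MSISENSOR", "MSI_SENSOR_SCORE", "MSI_SENSOR"]
  match preferred_exact.findSome? (fun pref => candidates.find? (fun attr_id => PySem.Str.upper attr_id == pref)) with
  | some a => (some a, candidates)
  | none =>
    match candidates.find? (fun attr_id =>
        let au := PySem.Str.replace (PySem.Str.replace (PySem.Str.upper attr_id) "_" "") " " ""
        PySem.Str.isIn "MSI" au && PySem.Str.isIn "SENSOR" au && PySem.Str.isIn "SCORE" au) with
    | some a => (some a, candidates)
    | none => (candidates.head?, candidates)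

-- ===== PORT B =====
def pvPreferred : List String := ["MSISENSOR_SCORE", "MSISENSOR", "MSI_SENSOR_SCORE", "MSI_SENSOR"]

def pvNorm (s : String) : String :=
  PySem.Str.replace (PySem.Str.replace (PySem.Str.upper s) "_" "") " " ""

def pvRank (attr_id : String) : Nat :=
  let u := PySem.Str.upper attr_id
  if pvPreferred.contains u then (PySem.List.index? pvPreferred u).getD 0
  else
    let n := pvNorm attr_id
    if PySem.Str.isIn "MSI" n && PySem.Str.isIn "SENSOR" n && PySem.Str.isIn "SCORE" n then 4 else 5

def choose_msisensor_attr_id_alt (clinical_data : List (List (String × String))) : Option String × List String :=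
  let attr_ids := PySem.List.sorted
    (PySem.Set.ofList (clinical_data.map (fun item => PySem.Dict.getD ⟨item⟩ "clinicalAttributeId" "")))
    (fun x => x) false
  let candidates := attr_ids.filter (fun a =>
    PySem.Str.isIn "MSISENSOR" (pvNorm a) && !PySem.Str.isIn "MANTIS" (pvNorm a))
  if candidates.isEmpty then (none, candidates)
  else (PySem.List.min? candidates pvRank, candidates)

-- ===== PRECONDITION & SPEC =====
def Spec_choose_msisensor_attr_id (clinical_data : List (List (String × String))) (out : Option String × List String) : Prop := out = choose_msisensor_attr_id_alt clinical_data
instance (clinical_data : List (List (String × String))) (out : Option String × List String) : Decidable (Spec_choose_msisensor_attr_id clinical_data out) := by unfold Spec_choose_msisensor_attr_id; infer_instance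

-- ===== CLAIM (what is proved, stated in full; the proofs are below) =====
def Claim_equal_choose_msisensor_attr_id : Prop := ∀ (clinical_data : List (List (String × String))), Dom_choose_msisensor_attr_id clinical_data → Spec_choose_msisensor_attr_id clinical_data (choose_msisensor_attr_id clinical_data)

-- ===== LEMMAS AND PROOFS =====

def pvTriple (a : String) : Bool :=
  PySem.Str.isIn "MSI" (pvNorm a) && PySem.Str.isIn "SENSOR" (pvNorm a) && PySem.Str.isIn "SCORE" (pvNorm a)

-- A's foldl-append candidate loop builds B's filter
theorem pv_cand_eq (xs : List String) :
    xs.foldl (fun acc attr_id =>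
      let attr_upper := PySem.Str.replace (PySem.Str.replace (PySem.Str.upper attr_id) "_" "") " " ""
      if PySem.Str.isIn "MSISENSOR" attr_upper && !PySem.Str.isIn "MANTIS" attr_upper
      then acc ++ [attr_id] else acc) [] =
    xs.filter (fun a => PySem.Str.isIn "MSISENSOR" (pvNorm a) && !PySem.Str.isIn "MANTIS" (pvNorm a)) := by
  rw [PySem.List.foldl_append_if_eq_filter]
  simp [pvNorm]

-- pointwise-equal predicates give the same find?
theorem pv_find?_congr {α : Type} (p q : α → Bool) (cs : List α)
    (h : ∀ a ∈ cs, p a = q a) : cs.find? p = cs.find? q := by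
  induction cs with
  | nil => rfl
  | cons x t ih =>
    simp only [List.find?_cons]
    rw [h x (by simp)]
    cases q x with
    | true => rfl
    | false => exact ih (fun a ha => h a (by simp [ha]))

theorem pv_find?_all_true {α : Type} (p : α → Bool) (cs : List α)
    (h : ∀ a ∈ cs, p a = true) : cs.find? p = cs.head? := by
  cases cs with
  | nil => rfl
  | cons x t => simp [h x (by simp)]

-- pvRank written out as an explicit if-chain
set_option maxRecDepth 4000 in
theorem pv_rank_spec (a : String) :
    pvRank a =
      (if PySem.Str.upper a = "MSISENSOR_SCORE" then 0
       else if PySem.Str.upper a = "MSISENSOR" then 1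
       else if PySem.Str.upper a = "MSI_SENSOR_SCORE" then 2
       else if PySem.Str.upper a = "MSI_SENSOR" then 3
       else if pvTriple a then 4 else 5) := by
  unfold pvRank pvPreferred pvTriple
  by_cases h0 : PySem.Str.upper a = "MSISENSOR_SCORE" <;>
  by_cases h1 : PySem.Str.upper a = "MSISENSOR" <;>
  by_cases h2 : PySem.Str.upper a = "MSI_SENSOR_SCORE" <;>
  by_cases h3 : PySem.Str.upper a = "MSI_SENSOR" <;>
    simp [h0, h1, h2, h3, PySem.List.index?_eq_idxOf?, List.idxOf?_cons, pvNorm, Bool.and_assoc]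

theorem pv_rank_le5 (a : String) : pvRank a ≤ 5 := by
  rw [pv_rank_spec]; split_ifs <;> omega

-- characterisation of the exact ranks 0..3
theorem pv_rank_eq0 (a : String) : pvRank a = 0 ↔ PySem.Str.upper a = "MSISENSOR_SCORE" := by
  rw [pv_rank_spec]; split_ifs <;> simp_all
theorem pv_rank_eq1 (a : String) : pvRank a = 1 ↔ PySem.Str.upper a = "MSISENSOR" := by
  rw [pv_rank_spec]; split_ifs <;> simp_all
theorem pv_rank_eq2 (a : String) : pvRank a = 2 ↔ PySem.Str.upper a = "MSI_SENSOR_SCORE" := by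
  rw [pv_rank_spec]; split_ifs <;> simp_all
theorem pv_rank_eq3 (a : String) : pvRank a = 3 ↔ PySem.Str.upper a = "MSI_SENSOR" := by
  rw [pv_rank_spec]; split_ifs <;> simp_all

-- a candidate with pvTriple set has rank at most 4
theorem pv_rank_of_triple (a : String) (h : pvTriple a = true) : pvRank a ≤ 4 := by
  rw [pv_rank_spec]; split_ifs <;> simp_all

-- the option-valued min? fold from a `some` start is the plain fold
theorem pv_foldl_some {α : Type} (key : α → Nat) : ∀ (t : List α) (m : α),
    t.foldl (fun acc x => match acc with
      | none => some x
      | some m' => if key x < key m' then some x else some m') (some m)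
    = some (t.foldl (fun m' x => if key x < key m' then x else m') m) := by
  intro t
  induction t with
  | nil => intro m; rfl
  | cons x t ih =>
    intro m
    simp only [List.foldl_cons]
    by_cases h : key x < key m
    · simpa [h] using ih x
    · simpa [h] using ih m

-- the running-min fold yields the FIRST minimum: it is minimal, and it is the first
-- element whose key is ≤ its key
theorem pv_fold_first {α : Type} (key : α → Nat) : ∀ (t : List α) (m : α),
    (∀ y ∈ t, key (t.foldl (fun m' x => if key x < key m' then x else m') m) ≤ key y) ∧
    key (t.foldl (fun m' x => if key x < key m' then x else m') m) ≤ key m ∧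
    (m :: t).find? (fun a => decide (key a ≤ key (t.foldl (fun m' x => if key x < key m' then x else m') m))) =
      some (t.foldl (fun m' x => if key x < key m' then x else m') m) := by
  intro t
  induction t with
  | nil =>
    intro m
    refine ⟨by simp, le_refl _, ?_⟩
    simp
  | cons x t ih =>
    intro m
    simp only [List.foldl_cons]
    by_cases h : key x < key m
    · simp only [if_pos h]
      obtain ⟨h1, h2, h3⟩ := ih x
      refine ⟨?_, le_of_lt (lt_of_le_of_lt h2 h), ?_⟩
      · intro y hy
        rcases List.mem_cons.mp hy with rfl | hy
        · exact h2
        · exact h1 y hy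
      · have hd : (decide (key m ≤ key (t.foldl (fun m' x => if key x < key m' then x else m') x))) = false := by
          simp only [decide_eq_false_iff_not]; omega
        simp only [List.find?_cons, hd]
        exact h3
    · simp only [if_neg h]
      obtain ⟨h1, h2, h3⟩ := ih m
      refine ⟨?_, h2, ?_⟩
      · intro y hy
        rcases List.mem_cons.mp hy with rfl | hy
        · omega
        · exact h1 y hy
      · set F := t.foldl (fun m' x => if key x < key m' then x else m') m with hF
        by_cases hm : key m ≤ key F
        · have hd : (decide (key m ≤ key F)) = true := by simpa using hm
          rw [List.find?_cons] at h3 ⊢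
          simpa [hd] using h3
        · have hd : (decide (key m ≤ key F)) = false := by simpa using hm
          rw [List.find?_cons] at h3 ⊢
          simp only [hd] at h3 ⊢
          have hdx : (decide (key x ≤ key F)) = false := by
            simp only [decide_eq_false_iff_not]; omega
          simp only [List.find?_cons, hdx]
          exact h3

-- min? returns the first element whose key is ≤ its own key (the first minimum)
theorem pv_min?_first {α : Type} (key : α → Nat) (cs : List α) (m : α)
    (h : PySem.List.min? cs key = some m) :
    cs.find? (fun a => decide (key a ≤ key m)) = some m := by
  cases cs with
  | nil => simp [PySem.List.min?] at h
  | cons x t =>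
    have hc : PySem.List.min? (x :: t) key
        = some (t.foldl (fun m' x => if key x < key m' then x else m') x) := by
      simp only [PySem.List.min?, List.foldl_cons]
      exact pv_foldl_some key t x
    rw [hc] at h
    injection h with h
    subst h
    exact (pv_fold_first key t x).2.2

-- an exact tier yields none when the minimal rank is larger than its index
theorem pv_tier_none (cs : List String) (m : String) (j : Nat) (p : String)
    (hchar : ∀ a, pvRank a = j ↔ PySem.Str.upper a = p)
    (hmin : ∀ a ∈ cs, pvRank m ≤ pvRank a) (hlt : j < pvRank m) :
    cs.find? (fun a => PySem.Str.upper a == p) = none := by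
  rw [List.find?_eq_none]
  intro a ha hb
  have : pvRank a = j := (hchar a).mpr (by simpa using hb)
  have := hmin a ha
  omega

-- the exact tier at the minimal rank tests exactly `rank ≤ rank m`
theorem pv_tier_pred (cs : List String) (m : String) (j : Nat) (p : String)
    (hchar : ∀ a, pvRank a = j ↔ PySem.Str.upper a = p)
    (hmin : ∀ a ∈ cs, pvRank m ≤ pvRank a) (hjm : pvRank m = j) :
    ∀ a ∈ cs, (PySem.Str.upper a == p) = decide (pvRank a ≤ pvRank m) := by
  intro a ha
  have hge := hmin a ha
  by_cases h : PySem.Str.upper a = p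
  · have : pvRank a = j := (hchar a).mpr h
    simp [h, this, hjm]
  · have : pvRank a ≠ j := fun hr => h ((hchar a).mp hr)
    have hb : (PySem.Str.upper a == p) = false := by simpa using h
    rw [hb]
    symm
    simp only [decide_eq_false_iff_not]
    omega

-- the selection parts agree, for any candidate list
theorem pv_sel_eq (cs : List String) :
    (match ["MSISENSOR_SCORE", "MSISENSOR", "MSI_SENSOR_SCORE", "MSI_SENSOR"].findSome?
        (fun pref => cs.find? (fun attr_id => PySem.Str.upper attr_id == pref)) with
     | some a => (some a, cs)
     | none =>
       match cs.find? (fun attr_id =>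
           let au := PySem.Str.replace (PySem.Str.replace (PySem.Str.upper attr_id) "_" "") " " ""
           PySem.Str.isIn "MSI" au && PySem.Str.isIn "SENSOR" au && PySem.Str.isIn "SCORE" au) with
       | some a => (some a, cs)
       | none => (cs.head?, cs) : Option String × List String) =
    (if cs.isEmpty then (none, cs) else (PySem.List.min? cs pvRank, cs)) := by
  cases hcs : cs with
  | nil => rfl
  | cons c t =>
    rw [← hcs]
    have hne : cs ≠ [] := by simp [hcs]
    obtain ⟨m, hm⟩ : ∃ m, PySem.List.min? cs pvRank = some m := by
      cases h : PySem.List.min? cs pvRank with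
      | none => exact absurd ((PySem.List.min?_eq_none_iff cs pvRank).mp h) hne
      | some m => exact ⟨m, rfl⟩
    have hmin : ∀ a ∈ cs, pvRank m ≤ pvRank a := PySem.List.min?_isMin hm
    have hfirst := pv_min?_first pvRank cs m hm
    have hEmpty : cs.isEmpty = false := by simp [hcs]
    rw [hEmpty, if_neg (by simp), hm]
    have h5 := pv_rank_le5 m
    -- the secondary predicate is pvTriple
    have hsec : cs.find? (fun attr_id =>
        let au := PySem.Str.replace (PySem.Str.replace (PySem.Str.upper attr_id) "_" "") " " ""
        PySem.Str.isIn "MSI" au && PySem.Str.isIn "SENSOR" au && PySem.Str.isIn "SCORE" au)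
        = cs.find? pvTriple := by
      exact pv_find?_congr _ _ cs (fun a _ => by simp [pvTriple, pvNorm])
    rcases (by omega : pvRank m = 0 ∨ pvRank m = 1 ∨ pvRank m = 2 ∨ pvRank m = 3 ∨ pvRank m = 4 ∨ pvRank m = 5) with hr|hr|hr|hr|hr|hr
    · -- rank 0: first exact tier hits
      have := pv_find?_congr _ _ cs (pv_tier_pred cs m 0 "MSISENSOR_SCORE" pv_rank_eq0 hmin hr)
      rw [List.findSome?_cons]
      rw [this, hfirst]
    · -- rank 1
      have t0 := pv_tier_none cs m 0 "MSISENSOR_SCORE" pv_rank_eq0 hmin (by omega)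
      have := pv_find?_congr _ _ cs (pv_tier_pred cs m 1 "MSISENSOR" pv_rank_eq1 hmin hr)
      simp only [List.findSome?_cons, t0]
      rw [this, hfirst]
    · -- rank 2
      have t0 := pv_tier_none cs m 0 "MSISENSOR_SCORE" pv_rank_eq0 hmin (by omega)
      have t1 := pv_tier_none cs m 1 "MSISENSOR" pv_rank_eq1 hmin (by omega)
      have := pv_find?_congr _ _ cs (pv_tier_pred cs m 2 "MSI_SENSOR_SCORE" pv_rank_eq2 hmin hr)
      simp only [List.findSome?_cons, t0, t1]
      rw [this, hfirst]
    · -- rank 3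
      have t0 := pv_tier_none cs m 0 "MSISENSOR_SCORE" pv_rank_eq0 hmin (by omega)
      have t1 := pv_tier_none cs m 1 "MSISENSOR" pv_rank_eq1 hmin (by omega)
      have t2 := pv_tier_none cs m 2 "MSI_SENSOR_SCORE" pv_rank_eq2 hmin (by omega)
      have := pv_find?_congr _ _ cs (pv_tier_pred cs m 3 "MSI_SENSOR" pv_rank_eq3 hmin hr)
      simp only [List.findSome?_cons, t0, t1, t2]
      rw [this, hfirst]
    · -- rank 4: all exact tiers miss, the secondary contains-scan hits
      have t0 := pv_tier_none cs m 0 "MSISENSOR_SCORE" pv_rank_eq0 hmin (by omega)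
      have t1 := pv_tier_none cs m 1 "MSISENSOR" pv_rank_eq1 hmin (by omega)
      have t2 := pv_tier_none cs m 2 "MSI_SENSOR_SCORE" pv_rank_eq2 hmin (by omega)
      have t3 := pv_tier_none cs m 3 "MSI_SENSOR" pv_rank_eq3 hmin (by omega)
      have hpred : ∀ a ∈ cs, pvTriple a = decide (pvRank a ≤ pvRank m) := by
        intro a ha
        have hge := hmin a ha
        rw [hr] at hge ⊢
        have hs := pv_rank_spec a
        by_cases htr : pvTriple a = true
        · have : pvRank a ≤ 4 := pv_rank_of_triple a htr
          simp [htr]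
          omega
        · have hf : pvTriple a = false := by simpa using htr
          rw [hs, hf] at hge ⊢
          split_ifs at hge ⊢ <;> simp_all
      have := pv_find?_congr _ _ cs hpred
      simp only [List.findSome?_cons, t0, t1, t2, t3, List.findSome?_nil]
      rw [hsec, this, hfirst]
    · -- rank 5: everything misses, the fallback head is the first minimum
      have t0 := pv_tier_none cs m 0 "MSISENSOR_SCORE" pv_rank_eq0 hmin (by omega)
      have t1 := pv_tier_none cs m 1 "MSISENSOR" pv_rank_eq1 hmin (by omega)
      have t2 := pv_tier_none cs m 2 "MSI_SENSOR_SCORE" pv_rank_eq2 hmin (by omega)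
      have t3 := pv_tier_none cs m 3 "MSI_SENSOR" pv_rank_eq3 hmin (by omega)
      have tsec : cs.find? pvTriple = none := by
        rw [List.find?_eq_none]
        intro a ha htr
        have := pv_rank_of_triple a htr
        have := hmin a ha
        omega
      have hall : ∀ a ∈ cs, (decide (pvRank a ≤ pvRank m)) = true := by
        intro a ha
        have := pv_rank_le5 a
        simp only [decide_eq_true_eq, hr]
        omega
      have hhead : cs.head? = some m := by
        rw [← pv_find?_all_true _ cs hall, hfirst]
      simp only [List.findSome?_cons, t0, t1, t2, t3, List.findSome?_nil]
      rw [hsec, tsec, hhead]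

-- ===== VERDICT (by name: the statement is the Claim_ definition above) =====
theorem choose_msisensor_attr_id_spec : Claim_equal_choose_msisensor_attr_id := by
  intro clinical_data _
  unfold Spec_choose_msisensor_attr_id
  simp only [choose_msisensor_attr_id, choose_msisensor_attr_id_alt]
  rw [pv_cand_eq]
  exact pv_sel_eq _
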